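-- pv_equiv track=rewrite | github.com/Noeyso/Algorithm-Study | Programmers/수학/위장.py | solution
-- ===== SOURCE A (Python) =====
-- from itertools import combinations,product
--
-- def solution(clothes):
--     di={}
--     for i in range(len(clothes)):
--         try:
--             di[clothes[i][1]]+=1
--         except KeyError:
--             di[clothes[i][1]]=1
--     lst = list(di.values())
--     if len(lst)==1:
--         return len(clothes)
--     res=0
--     for i in range(2,len(lst)+1):
--         arr=list(combinations(lst,i))
--         for j in range(len(arr)):
--             cnt=1
--             for k in range(len(arr[j])):
--                 cnt*=arr[j][k]
--             res+=cnt
--     return res+len(clothes)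
-- ===== SOURCE B (Python) =====
-- def solution(clothes):
--     counts = {}
--     for item in clothes:
--         counts[item[1]] = counts.get(item[1], 0) + 1
--     res = 1
--     for v in counts.values():
--         res *= v + 1
--     return res - 1
-- ===== Notes on version B (the rewrite author's own statement) =====
-- stated objective: faster
-- what changed: Instead of enumerating all size-i combinations of category counts and summing their products (exponential), B multiplies (count+1) over the categories once and subtracts 1, which equals the same subset-product sum in one linear pass.
import Mathlib
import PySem

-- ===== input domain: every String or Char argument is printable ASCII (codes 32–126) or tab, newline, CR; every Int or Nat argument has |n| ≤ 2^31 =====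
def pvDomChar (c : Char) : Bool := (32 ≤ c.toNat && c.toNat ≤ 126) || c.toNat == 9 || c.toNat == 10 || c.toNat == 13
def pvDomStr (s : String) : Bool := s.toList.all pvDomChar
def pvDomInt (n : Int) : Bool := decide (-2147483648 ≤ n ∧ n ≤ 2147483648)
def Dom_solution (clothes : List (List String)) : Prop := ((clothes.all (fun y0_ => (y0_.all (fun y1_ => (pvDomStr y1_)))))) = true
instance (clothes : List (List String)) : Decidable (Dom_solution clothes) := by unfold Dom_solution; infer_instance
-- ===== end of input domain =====

-- B replaces A's exponential enumeration of all size-i combinations of category counts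
-- by the closed form  prod (count+1) - 1  in one pass (objective: faster, asymptotic).

-- ===== PORT A =====
-- itertools.combinations(lst, k) on a list of ints, in itertools' order
def combosA : List Int → Nat → List (List Int)
  | _, 0 => [[]]
  | [], _ + 1 => []
  | x :: xs, k + 1 => (combosA xs k).map (x :: ·) ++ combosA xs (k + 1)

def solution (clothes : List (List String)) : Int :=
  let di : PySem.Dict String Int :=
    (PySem.List.pyRange 0 (clothes.length : Int) 1).foldl (fun d i =>
      match d.get? (PySem.List.pyGetD (PySem.List.pyGetD clothes i []) 1 "") with
      | some v => d.insert (PySem.List.pyGetD (PySem.List.pyGetD clothes i []) 1 "") (v + 1)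
        -- try: di[clothes[i][1]] += 1
      | none   => d.insert (PySem.List.pyGetD (PySem.List.pyGetD clothes i []) 1 "") 1
        -- except KeyError: di[clothes[i][1]] = 1
      ) PySem.Dict.empty
  let lst := di.values
  if lst.length == 1 then (clothes.length : Int)
  else
    let res := (PySem.List.pyRange 2 ((lst.length : Int) + 1) 1).foldl (fun res i =>
      let arr := combosA lst i.toNat
      (PySem.List.pyRange 0 (arr.length : Int) 1).foldl (fun res j =>
        res + (PySem.List.pyRange 0 ((PySem.List.pyGetD arr j []).length : Int) 1).foldl
          (fun cnt k => cnt * PySem.List.pyGetD (PySem.List.pyGetD arr j []) k 0) 1) res) 0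
    res + (clothes.length : Int)

-- ===== PORT B =====
def solution_alt (clothes : List (List String)) : Int :=
  let counts : PySem.Dict String Int :=
    clothes.foldl (fun d item =>
      d.insert (PySem.List.pyGetD item 1 "")
        (d.getD (PySem.List.pyGetD item 1 "") 0 + 1)) PySem.Dict.empty
  let res := counts.values.foldl (fun r v => r * (v + 1)) 1
  res - 1

-- ===== PRECONDITION & SPEC =====
-- Pre_ excludes exactly the inputs where a garment entry has fewer than 2 fields,
-- on which A (and B) raise IndexError at clothes[i][1].
def Pre_solution (clothes : List (List String)) : Prop :=
  ∀ c ∈ clothes, 2 ≤ c.length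
instance (clothes : List (List String)) : Decidable (Pre_solution clothes) := by
  unfold Pre_solution; infer_instance

def pvWitness_solution : List (List String) :=
  [["yellow_hat", "headgear"], ["blue_sunglasses", "eyewear"], ["green_turban", "headgear"]]

def Spec_solution (clothes : List (List String)) (out : Int) : Prop := out = solution_alt clothes
instance (clothes : List (List String)) (out : Int) : Decidable (Spec_solution clothes out) := by
  unfold Spec_solution; infer_instance

-- ===== CLAIM (what is proved, stated in full; the proofs are below) =====
def Claim_equal_solution : Prop := ∀ (clothes : List (List String)), Dom_solution clothes → Pre_solution clothes → Spec_solution clothes (solution clothes)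

-- ===== LEMMAS AND PROOFS =====

-- sum of products over all k-element combinations
def gsum (V : List Int) (k : Nat) : Int := ((combosA V k).map List.prod).sum

theorem combosA_eq_nil {V : List Int} {k : Nat} (h : V.length < k) : combosA V k = [] := by
  induction V generalizing k with
  | nil => cases k with
    | zero => omega
    | succ k => rfl
  | cons x xs ih =>
    cases k with
    | zero => omega
    | succ k =>
      simp only [combosA, List.append_eq_nil_iff, List.map_eq_nil_iff]
      constructor
      · exact ih (by simpa using Nat.lt_of_succ_lt_succ h)
      · exact ih (by simp at h ⊢; omega)

theorem gsum_zero (V : List Int) : gsum V 0 = 1 := by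
  cases V <;> simp [gsum, combosA]

theorem gsum_one (V : List Int) : gsum V 1 = V.sum := by
  induction V with
  | nil => rfl
  | cons x xs ih =>
    simp [gsum, combosA] at ih ⊢
    simpa [gsum_zero] using congrArg (x + ·) ih

theorem gsum_succ (x : Int) (xs : List Int) (k : Nat) :
    gsum (x :: xs) (k + 1) = x * gsum xs k + gsum xs (k + 1) := by
  simp [gsum, combosA, List.map_map, Function.comp_def, List.sum_map_mul_left]

-- the key identity: summing gsum over all sizes 0..|V| gives ∏ (v+1)
theorem gsum_total (V : List Int) :
    ∑ i ∈ Finset.range (V.length + 1), gsum V i = (V.map (· + 1)).prod := by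
  induction V with
  | nil => simp [gsum_zero]
  | cons x xs ih =>
    have hnil : gsum xs (xs.length + 1) = 0 := by
      simp [gsum, combosA_eq_nil (Nat.lt_succ_self _)]
    have h1 : ∑ k ∈ Finset.range (xs.length + 1), gsum xs (k + 1)
        = (xs.map (· + 1)).prod - 1 := by
      have h2 : ∑ i ∈ Finset.range (xs.length + 1 + 1), gsum xs i = (xs.map (· + 1)).prod := by
        rw [Finset.sum_range_succ, ih, hnil, add_zero]
      have h3 := Finset.sum_range_succ' (gsum xs) (xs.length + 1)
      rw [h2, gsum_zero] at h3
      linarith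
    have hlen : (x :: xs).length + 1 = xs.length + 1 + 1 := by simp
    rw [hlen, Finset.sum_range_succ' (gsum (x :: xs)) (xs.length + 1)]
    simp only [gsum_succ, gsum_zero, Finset.sum_add_distrib, ← Finset.mul_sum, ih, h1]
    simp [List.prod_cons]
    ring

-- list-range sum as a Finset.range sum (definitional)
theorem sum_map_range (m : Nat) (f : Nat → Int) :
    ((List.range m).map f).sum = ∑ i ∈ Finset.range m, f i := rfl

-- the values of counter ks sum to the number of elements of ks
theorem sum_values_counter (ks : List String) :
    (PySem.Dict.counter ks).values.sum = (ks.length : Int) := by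
  have hvals : (PySem.Dict.counter ks).values
      = (PySem.Set.ofList ks).map (fun k => (List.count k ks : Int)) := by
    simp [PySem.Dict.values, PySem.Dict.items_counter, List.map_map, Function.comp_def]
  have hperm : (PySem.Set.ofList ks).Perm ks.dedup := by
    rw [← PySem.List.dedup_eq_ofList]
    refine (List.perm_ext_iff_of_nodup (PySem.List.nodup_dedup ks) (List.nodup_dedup ks)).mpr ?_
    intro x; simp
  rw [hvals, (hperm.map _).sum_eq]
  have h1 := List.sum_map_count_dedup_eq_length ks
  calc (ks.dedup.map (fun k => (List.count k ks : Int))).sum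
      = ((ks.dedup.map (fun k => List.count k ks)).map (Nat.cast : Nat → Int)).sum := by
        rw [List.map_map]; rfl
    _ = ((ks.dedup.map fun x => ks.count x).sum : Int) := by rw [← Nat.cast_list_sum]
    _ = (ks.length : Int) := by rw [h1]

-- B's fold is the product of (v+1)
theorem foldl_mul_succ (V : List Int) :
    V.foldl (fun r v => r * (v + 1)) 1 = (V.map (· + 1)).prod := by
  rw [List.prod_eq_foldl, List.foldl_map]

theorem solution_eq (clothes : List (List String)) (_h : Pre_solution clothes) :
    solution clothes = solution_alt clothes := by
  rcases hcl : clothes with _ | ⟨c0, cs⟩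
  · decide
  rw [← hcl]
  have hne : clothes ≠ [] := by rw [hcl]; exact List.cons_ne_nil _ _
  clear hcl
  -- both count loops build counter of the key list
  have hA : (PySem.List.pyRange 0 (clothes.length : Int) 1).foldl (fun d i =>
      match d.get? (PySem.List.pyGetD (PySem.List.pyGetD clothes i []) 1 "") with
      | some v => d.insert (PySem.List.pyGetD (PySem.List.pyGetD clothes i []) 1 "") (v + 1)
      | none   => d.insert (PySem.List.pyGetD (PySem.List.pyGetD clothes i []) 1 "") 1)
      (PySem.Dict.empty : PySem.Dict String Int)
      = PySem.Dict.counter (clothes.map (fun item => PySem.List.pyGetD item 1 "")) := by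
    rw [PySem.List.foldl_pyRange_zero_pyGetD' clothes ([] : List String)
      (fun d item =>
        match d.get? (PySem.List.pyGetD item 1 "") with
        | some v => d.insert (PySem.List.pyGetD item 1 "") (v + 1)
        | none   => d.insert (PySem.List.pyGetD item 1 "") 1)
      (PySem.Dict.empty : PySem.Dict String Int)]
    have hfun : (fun (d : PySem.Dict String Int) (item : List String) =>
        match d.get? (PySem.List.pyGetD item 1 "") with
        | some v => d.insert (PySem.List.pyGetD item 1 "") (v + 1)
        | none   => d.insert (PySem.List.pyGetD item 1 "") 1)
        = fun d item => d.insert (PySem.List.pyGetD item 1 "")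
            (d.getD (PySem.List.pyGetD item 1 "") 0 + 1) := by
      funext d item
      rcases hg : d.get? (PySem.List.pyGetD item 1 "") with _ | v
      · simp [PySem.Dict.getD_eq_get?_getD, hg]
      · simp [PySem.Dict.getD_eq_get?_getD, hg]
    rw [hfun, ← PySem.Dict.foldl_insert_getD_add_one_eq_counter]
    exact (List.foldl_map (f := fun item => PySem.List.pyGetD item 1 "")
      (g := fun (d : PySem.Dict String Int) x => d.insert x (d.getD x 0 + 1))
      (l := clothes) (init := PySem.Dict.empty)).symm
  have hB : clothes.foldl (fun d item => d.insert (PySem.List.pyGetD item 1 "")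
        (d.getD (PySem.List.pyGetD item 1 "") 0 + 1)) PySem.Dict.empty
      = PySem.Dict.counter (clothes.map (fun item => PySem.List.pyGetD item 1 "")) := by
    rw [← PySem.Dict.foldl_insert_getD_add_one_eq_counter]
    exact (List.foldl_map (f := fun item => PySem.List.pyGetD item 1 "")
      (g := fun (d : PySem.Dict String Int) x => d.insert x (d.getD x 0 + 1))
      (l := clothes) (init := PySem.Dict.empty)).symm
  simp only [solution, solution_alt]
  rw [hA, hB, foldl_mul_succ]
  set ks := clothes.map (fun item => PySem.List.pyGetD item 1 "") with hks
  set V := (PySem.Dict.counter ks).values with hV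
  have hsum : V.sum = (clothes.length : Int) := by
    rw [hV, sum_values_counter, hks, List.length_map]
  by_cases h1 : V.length = 1
  · obtain ⟨v, hv⟩ := List.length_eq_one_iff.mp h1
    simp only [h1, beq_self_eq_true, if_pos]
    rw [hv] at hsum ⊢
    simp at hsum ⊢
    omega
  · simp only [beq_iff_eq, if_neg h1]
    -- the fold over V is nonsense below; collapse the three index loops
    have hinner : ∀ tup : List Int,
        (PySem.List.pyRange 0 (tup.length : Int) 1).foldl
          (fun cnt k => cnt * PySem.List.pyGetD tup k 0) 1 = tup.prod := by
      intro tup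
      rw [PySem.List.foldl_pyRange_zero_pyGetD' tup 0 (· * ·) 1, ← List.prod_eq_foldl]
    have hmid : ∀ (arr : List (List Int)) (r : Int),
        (PySem.List.pyRange 0 (arr.length : Int) 1).foldl (fun res j =>
          res + (PySem.List.pyRange 0 ((PySem.List.pyGetD arr j []).length : Int) 1).foldl
            (fun cnt k => cnt * PySem.List.pyGetD (PySem.List.pyGetD arr j []) k 0) 1) r
        = r + (arr.map List.prod).sum := by
      intro arr r
      rw [PySem.List.foldl_pyRange_zero_pyGetD' arr ([] : List Int)
        (fun res tup => res + (PySem.List.pyRange 0 (tup.length : Int) 1).foldl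
          (fun cnt k => cnt * PySem.List.pyGetD tup k 0) 1) r]
      have hfun2 : (fun (res : Int) (tup : List Int) =>
          res + (PySem.List.pyRange 0 (tup.length : Int) 1).foldl
            (fun cnt k => cnt * PySem.List.pyGetD tup k 0) 1)
          = fun res tup => res + tup.prod := by
        funext res tup; rw [hinner]
      rw [hfun2, PySem.List.foldl_add]
    have houter : (fun (res i : Int) =>
        (PySem.List.pyRange 0 (((combosA V i.toNat).length : Int)) 1).foldl (fun res j =>
          res + (PySem.List.pyRange 0 ((PySem.List.pyGetD (combosA V i.toNat) j []).length : Int) 1).foldl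
            (fun cnt k => cnt * PySem.List.pyGetD (PySem.List.pyGetD (combosA V i.toNat) j []) k 0) 1) res)
        = fun res i => res + gsum V i.toNat := by
      funext res i; rw [hmid]; rfl
    rw [houter, PySem.List.foldl_add]
    -- V is nonempty, and its length is not 1, so it is m + 2
    have hVne : V ≠ [] := by
      intro hnil
      have hlen : (PySem.Set.ofList ks : List String).length = 0 := by
        have h2 : V.length = (PySem.Set.ofList ks : List String).length := by
          rw [hV]; simp [PySem.Dict.values, PySem.Dict.items_counter]
        rw [hnil] at h2; simpa using h2.symm
      rcases hcl2 : clothes with _ | ⟨c0, cs⟩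
      · exact hne hcl2
      have hmem : PySem.List.pyGetD c0 1 "" ∈ (PySem.Set.ofList ks : List String) := by
        rw [PySem.Set.mem_ofList, hks, hcl2]; simp
      exact (List.ne_nil_of_mem hmem) (List.length_eq_zero_iff.mp hlen)
    obtain ⟨m, hm⟩ : ∃ m, V.length = m + 2 := by
      rcases hn : V.length with _ | _ | n
      · exact absurd (List.length_eq_zero_iff.mp hn) hVne
      · exact absurd hn h1
      · exact ⟨n, rfl⟩
    rw [PySem.List.pyRange_one 2 ((V.length : Int) + 1), hm]
    have htn : (((m + 2 : Nat) : Int) + 1 - 2).toNat = m + 1 := by omega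
    rw [htn, List.map_map]
    have hfun3 : ((fun i => gsum V i.toNat) ∘ fun k : Nat => (2 : Int) + ↑k)
        = fun k : Nat => gsum V (k + 2) := by
      funext k
      have : ((2 : Int) + (k : Int)).toNat = k + 2 := by omega
      simp [this]
    rw [hfun3, sum_map_range]
    -- relate to the closed form
    have htot := gsum_total V
    rw [hm, show m + 2 + 1 = (m + 2) + 1 from rfl, Finset.sum_range_succ' _ (m + 2),
      Finset.sum_range_succ' _ (m + 1), gsum_zero, gsum_one] at htot
    have hz : ∀ j, gsum V (j + 1 + 1) = gsum V (j + 2) := fun j => rfl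
    simp only [hz] at htot
    linarith

-- ===== VERDICT (by name: the statement is the Claim_ definition above) =====
theorem solution_spec : Claim_equal_solution := by
  intro clothes _ hpre
  unfold Spec_solution
  exact solution_eq clothes hpre
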